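-- pv_equiv track=rewrite | github.com/dynaroars/dig | src/beta/max_deg.py | is_valid_pair
-- ===== SOURCE A (Python) =====
-- def is_valid_pair(var1, var2, consts):
--     str_var1 = var1[0]
--     str_var2 = var2[0]
--     for i in consts:
--         str_var1 = str_var1.replace(i[0], "")
--         str_var2 = str_var2.replace(i[0], "")
--     str = set(str_var1) & set(str_var2)
--     for i in str:
--         str_var1 = str_var1.replace(i, "")
--         str_var2 = str_var2.replace(i, "")
--     if str_var1 != var1[0] or str_var2 != var2[0]:
--         # if len(str_var1) == 0 or len(str_var2) == 0:
--         return False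
--     return True
-- ===== SOURCE B (Python) =====
-- def is_valid_pair(var1, var2, consts):
--     s1, s2 = var1[0], var2[0]
--     if any(c[0] and (c[0] in s1 or c[0] in s2) for c in consts):
--         return False
--     return set(s1).isdisjoint(s2)
-- ===== Notes on version B (the rewrite author's own statement) =====
-- stated objective: simpler
-- what changed: B replaces A's two destructive replace-loops plus compare-to-original with a direct test: short-circuit scan for any const substring occurring in either string, then a set-disjointness check of the two original strings.
import Mathlib
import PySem

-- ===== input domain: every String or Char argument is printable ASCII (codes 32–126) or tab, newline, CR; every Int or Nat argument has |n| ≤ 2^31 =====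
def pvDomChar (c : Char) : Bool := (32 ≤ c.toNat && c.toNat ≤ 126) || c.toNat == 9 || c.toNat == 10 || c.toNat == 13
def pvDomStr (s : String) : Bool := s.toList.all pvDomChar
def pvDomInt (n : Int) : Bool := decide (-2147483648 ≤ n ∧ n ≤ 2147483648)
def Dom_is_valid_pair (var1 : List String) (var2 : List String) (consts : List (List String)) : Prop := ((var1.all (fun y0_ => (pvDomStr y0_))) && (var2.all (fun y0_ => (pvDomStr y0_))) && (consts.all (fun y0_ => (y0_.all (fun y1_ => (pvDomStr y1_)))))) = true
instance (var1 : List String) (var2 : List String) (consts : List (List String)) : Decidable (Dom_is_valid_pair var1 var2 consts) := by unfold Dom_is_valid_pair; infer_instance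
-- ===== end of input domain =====

-- B replaces A's two destructive replace-loops + compare-to-original with a short-circuit
-- substring scan over consts and a set-disjointness check of the two original strings (simpler).


-- ===== PORT A =====
-- for i in consts: str_var1 = str_var1.replace(i[0], ""); str_var2 = str_var2.replace(i[0], "")
def pvConstLoopA : List (List String) → String → String → String × String
  | [], s1, s2 => (s1, s2)
  | i :: rest, s1, s2 =>
      -- i[0]: IndexError (pyGet? = none) on an empty tuple is excluded by Pre_
      pvConstLoopA rest (PySem.Str.replace s1 ((PySem.List.pyGet? i 0).getD "") "")
                        (PySem.Str.replace s2 ((PySem.List.pyGet? i 0).getD "") "")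

-- for i in str: … (removing distinct single chars commutes, so the result is set-iteration-order independent)
def pvCharLoopA : List Char → String → String → String × String
  | [], s1, s2 => (s1, s2)
  | c :: rest, s1, s2 =>
      pvCharLoopA rest (PySem.Str.replace s1 (String.ofList [c]) "")
                       (PySem.Str.replace s2 (String.ofList [c]) "")

def is_valid_pair (var1 : List String) (var2 : List String) (consts : List (List String)) : Bool :=
  let v1 := (PySem.List.pyGet? var1 0).getD ""   -- var1[0]; none excluded by Pre_
  let v2 := (PySem.List.pyGet? var2 0).getD ""   -- var2[0]
  let p := pvConstLoopA consts v1 v2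
  let str := PySem.Set.inter (PySem.Set.ofList p.1.toList) (PySem.Set.ofList p.2.toList)
  let q := pvCharLoopA str p.1 p.2
  if q.1 ≠ v1 ∨ q.2 ≠ v2 then false else true

-- ===== PORT B =====
def is_valid_pair_alt (var1 : List String) (var2 : List String) (consts : List (List String)) : Bool :=
  let s1 := (PySem.List.pyGet? var1 0).getD ""   -- var1[0]; none excluded by Pre_
  let s2 := (PySem.List.pyGet? var2 0).getD ""   -- var2[0]
  if consts.any (fun c =>
      let t := (PySem.List.pyGet? c 0).getD ""   -- c[0]
      decide (t ≠ "") && (PySem.Str.isIn t s1 || PySem.Str.isIn t s2)) then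
    false
  else
    PySem.Set.isdisjoint (PySem.Set.ofList s1.toList) s2.toList

-- ===== PRECONDITION & SPEC =====
-- Pre_ excludes exactly the inputs where A raises IndexError: empty var1/var2 or an empty tuple in consts.
def Pre_is_valid_pair (var1 : List String) (var2 : List String) (consts : List (List String)) : Prop :=
  var1 ≠ [] ∧ var2 ≠ [] ∧ ∀ c ∈ consts, c ≠ []
instance (var1 : List String) (var2 : List String) (consts : List (List String)) : Decidable (Pre_is_valid_pair var1 var2 consts) := by unfold Pre_is_valid_pair; infer_instance

def pvWitness_is_valid_pair : List String × List String × List (List String) := (["ab"], ["cd"], [["x"]])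

def Spec_is_valid_pair (var1 : List String) (var2 : List String) (consts : List (List String)) (out : Bool) : Prop := out = is_valid_pair_alt var1 var2 consts
instance (var1 : List String) (var2 : List String) (consts : List (List String)) (out : Bool) : Decidable (Spec_is_valid_pair var1 var2 consts out) := by unfold Spec_is_valid_pair; infer_instance

-- ===== CLAIM (what is proved, stated in full; the proofs are below) =====
def Claim_equal_is_valid_pair : Prop := ∀ (var1 : List String) (var2 : List String) (consts : List (List String)), Dom_is_valid_pair var1 var2 consts → Pre_is_valid_pair var1 var2 consts → Spec_is_valid_pair var1 var2 consts (is_valid_pair var1 var2 consts)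

-- ===== LEMMAS AND PROOFS =====

theorem pv_go_len (old : List Char) (fuel : Nat) : ∀ l acc : List Char,
    (PySem.Chars.replace.go old [] fuel l acc).length ≤ acc.length + l.length := by
  induction fuel with
  | zero => intro l acc; rw [PySem.Chars.replace.go]; simp
  | succ n ih =>
    intro l acc
    cases l with
    | nil => rw [PySem.Chars.replace.go] <;> simp
    | cons c t =>
      rw [PySem.Chars.replace.go]
      split
      · have h := ih (List.drop old.length (c::t)) ([].reverse ++ acc)
        have h2 : (List.drop old.length (c::t)).length ≤ (c::t).length := by
          simp [List.length_drop]
        simp at h h2 ⊢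
        omega
      · have h := ih t (c :: acc)
        simp at h ⊢
        omega

theorem pv_go_nohit (old : List Char) (fuel : Nat) : ∀ l acc : List Char,
    ¬ old <:+: l → PySem.Chars.replace.go old [] fuel l acc = acc.reverse ++ l := by
  induction fuel with
  | zero => intro l acc _; rw [PySem.Chars.replace.go]
  | succ n ih =>
    intro l acc hnin
    cases l with
    | nil => rw [PySem.Chars.replace.go] <;> simp
    | cons c t =>
      rw [PySem.Chars.replace.go]
      have hpre : ¬ (old.isPrefixOf (c::t) = true) := by
        simp only [List.isPrefixOf_iff_prefix]
        exact fun h => hnin h.isInfix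
      rw [if_neg hpre]
      rw [ih t (c::acc) (fun h => hnin (List.infix_cons_iff.mpr (Or.inr h)))]
      simp

theorem pv_go_hit (old : List Char) (hold : old ≠ []) (fuel : Nat) : ∀ l acc : List Char,
    old <:+: l → l.length ≤ fuel →
    (PySem.Chars.replace.go old [] fuel l acc).length < acc.length + l.length := by
  induction fuel with
  | zero =>
    intro l acc hin hlen
    have : l = [] := List.eq_nil_of_length_eq_zero (by omega)
    subst this
    exact absurd (List.eq_nil_of_infix_nil hin) hold
  | succ n ih =>
    intro l acc hin hlen
    cases l with
    | nil => exact absurd (List.eq_nil_of_infix_nil hin) hold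
    | cons c t =>
      rw [PySem.Chars.replace.go]
      by_cases hpre : old.isPrefixOf (c::t) = true
      · rw [if_pos hpre]
        have h := pv_go_len old n (List.drop old.length (c::t)) ([].reverse ++ acc)
        have h1 : 1 ≤ old.length := by
          cases old with | nil => exact absurd rfl hold | cons _ _ => simp
        simp [List.length_drop] at h ⊢
        omega
      · rw [if_neg hpre]
        have htin : old <:+: t := by
          rcases List.infix_cons_iff.mp hin with h | h
          · exact absurd (List.isPrefixOf_iff_prefix.mpr h) hpre
          · exact h
        have := ih t (c::acc) htin (by simp at hlen; omega)
        simp at this ⊢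
        omega

theorem pv_replace_toList (s old : String) :
    (PySem.Str.replace s old "").toList = PySem.Chars.replace s.toList old.toList [] := by
  simp [PySem.Str.replace]

theorem pv_toList_ne_nil (t : String) (h : t ≠ "") : t.toList ≠ [] := by
  intro hn
  exact h (String.ext_iff.mpr (by simpa using hn))

theorem pv_replace_len_le (s old : String) :
    (PySem.Str.replace s old "").toList.length ≤ s.toList.length := by
  rw [pv_replace_toList, PySem.Chars.replace]
  by_cases h : old.toList.isEmpty
  · simp_all [List.isEmpty_iff]
  · rw [if_neg h]
    simpa using pv_go_len old.toList s.toList.length s.toList []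

theorem pv_replace_len_lt (s old : String) (h1 : old ≠ "") (h2 : PySem.Str.isIn old s = true) :
    (PySem.Str.replace s old "").toList.length < s.toList.length := by
  have hol := pv_toList_ne_nil old h1
  rw [pv_replace_toList, PySem.Chars.replace]
  rw [if_neg (by simpa [List.isEmpty_iff] using hol)]
  have hin : old.toList <:+: s.toList := (PySem.Str.isIn_iff_infix old s).mp h2
  simpa using pv_go_hit old.toList hol s.toList.length s.toList [] hin (le_refl _)

theorem pv_replace_id (s old : String) (h : old = "" ∨ PySem.Str.isIn old s = false) :
    PySem.Str.replace s old "" = s := by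
  apply String.ext_iff.mpr
  rw [pv_replace_toList, PySem.Chars.replace]
  rcases h with h | h
  · subst h
    simp
  · have hnin : ¬ old.toList <:+: s.toList := by
      intro hc
      have ht := (PySem.Str.isIn_iff_infix old s).mpr hc
      rw [ht] at h
      exact Bool.noConfusion h
    by_cases ho : old.toList.isEmpty
    · exfalso
      exact hnin (by simp [List.isEmpty_iff] at ho; simp [ho])
    · rw [if_neg ho]
      simpa using pv_go_nohit old.toList s.toList.length s.toList [] hnin

theorem pvConstLoopA_mono (consts : List (List String)) : ∀ s1 s2 : String,
    (pvConstLoopA consts s1 s2).1.toList.length ≤ s1.toList.length ∧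
    (pvConstLoopA consts s1 s2).2.toList.length ≤ s2.toList.length := by
  induction consts with
  | nil => intro s1 s2; simp [pvConstLoopA]
  | cons i rest ih =>
    intro s1 s2
    rw [pvConstLoopA]
    constructor
    · exact le_trans (ih _ _).1 (pv_replace_len_le _ _)
    · exact le_trans (ih _ _).2 (pv_replace_len_le _ _)

theorem pvCharLoopA_mono (cs : List Char) : ∀ s1 s2 : String,
    (pvCharLoopA cs s1 s2).1.toList.length ≤ s1.toList.length ∧
    (pvCharLoopA cs s1 s2).2.toList.length ≤ s2.toList.length := by
  induction cs with
  | nil => intro s1 s2; simp [pvCharLoopA]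
  | cons c rest ih =>
    intro s1 s2
    rw [pvCharLoopA]
    constructor
    · exact le_trans (ih _ _).1 (pv_replace_len_le _ _)
    · exact le_trans (ih _ _).2 (pv_replace_len_le _ _)

theorem pvConstLoopA_nohit (s1 s2 : String) (consts : List (List String))
    (h : ∀ c ∈ consts, (decide (((PySem.List.pyGet? c 0).getD "") ≠ "") &&
        (PySem.Str.isIn ((PySem.List.pyGet? c 0).getD "") s1 ||
         PySem.Str.isIn ((PySem.List.pyGet? c 0).getD "") s2)) = false) :
    pvConstLoopA consts s1 s2 = (s1, s2) := by
  induction consts with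
  | nil => rfl
  | cons i rest ih =>
    have hi := h i (List.mem_cons_self ..)
    rw [pvConstLoopA]
    have hcase : ((PySem.List.pyGet? i 0).getD "") = "" ∨
        (PySem.Str.isIn ((PySem.List.pyGet? i 0).getD "") s1 = false ∧
         PySem.Str.isIn ((PySem.List.pyGet? i 0).getD "") s2 = false) := by
      by_cases ht : ((PySem.List.pyGet? i 0).getD "") = ""
      · exact Or.inl ht
      · simp [ht] at hi
        exact Or.inr hi
    have h1 : PySem.Str.replace s1 ((PySem.List.pyGet? i 0).getD "") "" = s1 :=
      pv_replace_id _ _ (hcase.imp id And.left)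
    have h2 : PySem.Str.replace s2 ((PySem.List.pyGet? i 0).getD "") "" = s2 :=
      pv_replace_id _ _ (hcase.imp id And.right)
    rw [h1, h2]
    exact ih (fun c hc => h c (List.mem_cons_of_mem _ hc))

theorem pvConstLoopA_hit (s1 s2 : String) (consts : List (List String))
    (h : consts.any (fun c =>
        decide (((PySem.List.pyGet? c 0).getD "") ≠ "") &&
        (PySem.Str.isIn ((PySem.List.pyGet? c 0).getD "") s1 ||
         PySem.Str.isIn ((PySem.List.pyGet? c 0).getD "") s2)) = true) :
    (pvConstLoopA consts s1 s2).1.toList.length < s1.toList.length ∨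
    (pvConstLoopA consts s1 s2).2.toList.length < s2.toList.length := by
  induction consts with
  | nil => simp at h
  | cons i rest ih =>
    rw [List.any_cons] at h
    rw [pvConstLoopA]
    by_cases hi : (decide (((PySem.List.pyGet? i 0).getD "") ≠ "") &&
        (PySem.Str.isIn ((PySem.List.pyGet? i 0).getD "") s1 ||
         PySem.Str.isIn ((PySem.List.pyGet? i 0).getD "") s2)) = true
    · rcases Bool.and_eq_true_iff.mp hi with ⟨hne, hor⟩
      have hne' : ((PySem.List.pyGet? i 0).getD "") ≠ "" := of_decide_eq_true hne
      rcases Bool.or_eq_true_iff.mp hor with hin | hin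
      · left
        exact lt_of_le_of_lt (pvConstLoopA_mono rest _ _).1 (pv_replace_len_lt s1 _ hne' hin)
      · right
        exact lt_of_le_of_lt (pvConstLoopA_mono rest _ _).2 (pv_replace_len_lt s2 _ hne' hin)
    · have hrest : (rest.any (fun c =>
          decide (((PySem.List.pyGet? c 0).getD "") ≠ "") &&
          (PySem.Str.isIn ((PySem.List.pyGet? c 0).getD "") s1 ||
           PySem.Str.isIn ((PySem.List.pyGet? c 0).getD "") s2))) = true := by
        rcases Bool.or_eq_true_iff.mp h with h' | h'
        · exact absurd h' hi
        · exact h'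
      have hcase : ((PySem.List.pyGet? i 0).getD "") = "" ∨
          (PySem.Str.isIn ((PySem.List.pyGet? i 0).getD "") s1 = false ∧
           PySem.Str.isIn ((PySem.List.pyGet? i 0).getD "") s2 = false) := by
        by_cases ht : ((PySem.List.pyGet? i 0).getD "") = ""
        · exact Or.inl ht
        · simp [ht] at hi
          exact Or.inr hi
      rw [pv_replace_id _ _ (hcase.imp id And.left), pv_replace_id _ _ (hcase.imp id And.right)]
      exact ih hrest

theorem pv_singleton_isIn (c : Char) (s : String) (h : c ∈ s.toList) :
    PySem.Str.isIn (String.ofList [c]) s = true := by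
  apply (PySem.Str.isIn_iff_infix _ s).mpr
  simpa [String.toList_ofList, List.singleton_infix_iff] using h

theorem pv_mk_singleton_ne (c : Char) : String.ofList [c] ≠ "" := by
  intro h
  have := congrArg String.toList h
  simp at this

theorem pv_ne_of_len_lt (a b : String) (h : a.toList.length < b.toList.length) : a ≠ b := by
  intro he
  rw [he] at h
  omega

-- ===== VERDICT (by name: the statement is the Claim_ definition above) =====
theorem is_valid_pair_spec : Claim_equal_is_valid_pair := by
  intro var1 var2 consts _ hpre
  obtain ⟨h1, h2, _⟩ := hpre
  obtain ⟨v1, r1, rfl⟩ : ∃ v r, var1 = v :: r := by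
    cases var1 with
    | nil => exact absurd rfl h1
    | cons a b => exact ⟨a, b, rfl⟩
  obtain ⟨v2, r2, rfl⟩ : ∃ v r, var2 = v :: r := by
    cases var2 with
    | nil => exact absurd rfl h2
    | cons a b => exact ⟨a, b, rfl⟩
  unfold Spec_is_valid_pair is_valid_pair is_valid_pair_alt
  have hget1 : (PySem.List.pyGet? (v1 :: r1) (0 : Int)).getD "" = v1 := by
    simp [PySem.List.pyGet?, PySem.List.pyIdx?]
  have hget2 : (PySem.List.pyGet? (v2 :: r2) (0 : Int)).getD "" = v2 := by
    simp [PySem.List.pyGet?, PySem.List.pyIdx?]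
  simp only [hget1, hget2]
  by_cases hB : consts.any (fun c =>
      decide (((PySem.List.pyGet? c 0).getD "") ≠ "") &&
      (PySem.Str.isIn ((PySem.List.pyGet? c 0).getD "") v1 ||
       PySem.Str.isIn ((PySem.List.pyGet? c 0).getD "") v2)) = true
  · -- a const substring occurs: A's final strings are strictly shorter on some side
    rw [if_pos hB]
    rcases pvConstLoopA_hit v1 v2 consts hB with hlt | hlt
    · exact if_pos (Or.inl (pv_ne_of_len_lt _ _
        (lt_of_le_of_lt (pvCharLoopA_mono _ _ _).1 hlt)))
    · exact if_pos (Or.inr (pv_ne_of_len_lt _ _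
        (lt_of_le_of_lt (pvCharLoopA_mono _ _ _).2 hlt)))
  · -- no const occurs: the first loop is the identity
    rw [if_neg hB]
    have hno := pvConstLoopA_nohit v1 v2 consts (by
      intro c hc
      rcases Bool.eq_false_or_eq_true (decide (((PySem.List.pyGet? c 0).getD "") ≠ "") &&
        (PySem.Str.isIn ((PySem.List.pyGet? c 0).getD "") v1 ||
         PySem.Str.isIn ((PySem.List.pyGet? c 0).getD "") v2)) with h | h
      · exact absurd (List.any_eq_true.mpr ⟨c, hc, h⟩) hB
      · exact h)
    rw [hno]
    by_cases hd : PySem.Set.isdisjoint (PySem.Set.ofList v1.toList) v2.toList = true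
    · -- disjoint: the intersection is empty, the char loop is the identity, A returns True
      rw [hd]
      have hI : PySem.Set.inter (PySem.Set.ofList v1.toList) (PySem.Set.ofList v2.toList) = [] := by
        rw [PySem.Set.inter, List.filter_eq_nil_iff]
        rw [PySem.Set.isdisjoint] at hd
        simp only [Bool.not_eq_eq_eq_not, Bool.not_true, List.any_eq_false] at hd
        intro x hx hcont
        have hx2 : x ∈ v2.toList := by
          have := List.mem_of_elem_eq_true hcont
          exact (PySem.Set.mem_ofList _ _).mp this
        exact absurd (List.elem_eq_true_of_mem hx2) (by simpa using hd x hx)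
      rw [hI, pvCharLoopA, if_neg (by simp)]
    · -- not disjoint: a shared char exists, the char loop strictly shrinks both strings
      have hdf : PySem.Set.isdisjoint (PySem.Set.ofList v1.toList) v2.toList = false :=
        Bool.eq_false_iff.mpr hd
      rw [hdf]
      cases hI : PySem.Set.inter (PySem.Set.ofList v1.toList) (PySem.Set.ofList v2.toList) with
      | nil =>
        exfalso
        apply hd
        rw [PySem.Set.isdisjoint]
        rw [PySem.Set.inter, List.filter_eq_nil_iff] at hI
        simp only [Bool.not_eq_eq_eq_not, Bool.not_true, List.any_eq_false]
        intro x hx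
        have := hI x hx
        intro hc
        exact this (List.elem_eq_true_of_mem ((PySem.Set.mem_ofList _ _).mpr (List.mem_of_elem_eq_true hc)))
      | cons c rest =>
        have hcmem : c ∈ List.filter (fun x => (PySem.Set.ofList v2.toList).contains x) (PySem.Set.ofList v1.toList) := by
          rw [← PySem.Set.inter, hI]
          exact List.mem_cons_self ..
        have hc1 : c ∈ v1.toList :=
          (PySem.Set.mem_ofList _ _).mp (List.mem_filter.mp hcmem).1
        have hc2 : c ∈ v2.toList :=
          (PySem.Set.mem_ofList _ _).mp (List.mem_of_elem_eq_true (List.mem_filter.mp hcmem).2)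
        rw [pvCharLoopA]
        exact if_pos (Or.inl (pv_ne_of_len_lt _ _
          (lt_of_le_of_lt (pvCharLoopA_mono rest _ _).1
            (pv_replace_len_lt v1 _ (pv_mk_singleton_ne c) (pv_singleton_isIn c v1 hc1)))))
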